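-- pv_equiv track=rewrite | github.com/daniel880423/Member_System | file/hw2/1100440/s1100440_2.py | homework_2
-- ===== SOURCE A (Python) =====
-- def homework_2(lst):  # 請同學記得把檔案名稱改成自己的學號(ex.1104813.py)
--     now = 0
--     step = 0
--     if lst[now] % 2 != 0:                      # 處理list的第一個數字
--         lst[now] += 1
--         step += 1
--         now += 1
--     else:
--         now = 1
--
--     for i in lst[1:]:                               # 處理list第一個以後的數字
--
--         if i <= lst[now-1]:
--             lst[now] = lst[now-1] + 2
--             step += lst[now] - i
--             now += 1
--
--         elif i % 2 != 0:
--             lst[now] += 1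
--             step += 1
--             now += 1
--
--         elif i % 2 == 0:
--             now += 1
--
--     return step
-- ===== SOURCE B (Python) =====
-- def homework_2(lst):
--     # stage 1: shift-normalize: key_i = (smallest even >= v_i) - 2*i
--     keys = [v + v % 2 - 2 * i for i, v in enumerate(lst)]
--     # stage 2: running (prefix) maxima of the keys
--     maxs = []
--     for k in keys:
--         maxs.append(k if not maxs or k > maxs[-1] else maxs[-1])
--     # stage 3: un-shift (target_i = prefixmax_i + 2*i), write back, sum increments
--     total = 0
--     for i, (m, v) in enumerate(zip(maxs, lst)):
--         t = m + 2 * i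
--         total += t - v
--         lst[i] = t
--     return total
-- ===== Notes on version B (the rewrite author's own statement) =====
-- stated objective: alternative
-- what changed: Replaces A's stateful single pass (three-way branch over the mutated list with index bookkeeping) by three staged passes: shift-normalize each value to key_i = even-ceil(v_i) - 2i, take running prefix maxima of the keys, then un-shift target_i = prefixmax_i + 2i and sum the increments.
import Mathlib
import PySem

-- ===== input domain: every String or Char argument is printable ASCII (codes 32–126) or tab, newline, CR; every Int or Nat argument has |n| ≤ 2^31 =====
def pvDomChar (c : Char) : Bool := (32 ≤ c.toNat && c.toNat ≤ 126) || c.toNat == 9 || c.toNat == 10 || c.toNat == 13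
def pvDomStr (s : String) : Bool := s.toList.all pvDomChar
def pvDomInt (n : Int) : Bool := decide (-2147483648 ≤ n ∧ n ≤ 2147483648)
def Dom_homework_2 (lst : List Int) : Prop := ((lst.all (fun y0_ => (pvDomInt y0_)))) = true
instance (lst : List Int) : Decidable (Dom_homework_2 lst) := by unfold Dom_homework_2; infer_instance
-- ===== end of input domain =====

-- B replaces A's stateful single pass by three staged passes: shift-normalize key_i = even-ceil(v_i) - 2i,
-- prefix maxima, then un-shift target_i = prefixmax_i + 2i and sum; both Pythons mutate lst in place
-- identically, the theorems here are about the RETURN value only.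

-- ===== PORT A =====
-- A's for-loop over lst[1:]: state is (the mutated list, now, step); now is a Nat (always ≥ 1 here).
def hwA_loop : List Int → List Int → Nat → Int → Int
  | [], _, _, step => step
  | i :: rest, lst, now, step =>
    let prev := lst.getD (now - 1) 0
    if i ≤ prev then
      hwA_loop rest (lst.set now (prev + 2)) (now + 1) (step + (prev + 2 - i))
    else if PySem.Int.mod i 2 ≠ 0 then
      hwA_loop rest (lst.set now (lst.getD now 0 + 1)) (now + 1) (step + 1)
    else
      hwA_loop rest lst (now + 1) step

def homework_2 (lst : List Int) : Int :=
  match PySem.List.pyGet? lst 0 with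
  | none => 0          -- Python raises IndexError (first-element access) here; excluded by Pre_homework_2
  | some x0 =>
    if PySem.Int.mod x0 2 ≠ 0 then
      let lst1 := lst.set 0 (x0 + 1)
      hwA_loop (PySem.List.slice lst1 (some 1) none) lst1 1 1
    else
      hwA_loop (PySem.List.slice lst (some 1) none) lst 1 0

-- ===== PORT B =====
-- stage 2 of Source B: maxs.append(k if not maxs or k > maxs[-1] else maxs[-1])
def hwB_maxs : List Int → List Int → List Int
  | [], acc => acc
  | k :: rest, acc =>
    let nxt := match acc.getLast? with
      | none => k
      | some m => if k > m then k else m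
    hwB_maxs rest (acc ++ [nxt])

def homework_2_alt (lst : List Int) : Int :=
  let keys := (PySem.List.enumerate lst 0).map (fun p => p.2 + PySem.Int.mod p.2 2 - 2 * p.1)
  let maxs := hwB_maxs keys []
  (PySem.List.enumerate (maxs.zip lst) 0).foldl
    (fun tot p => tot + ((p.2.1 + 2 * p.1) - p.2.2)) 0

-- ===== PRECONDITION & SPEC =====
-- Pre_ excludes only the empty list, on which Python A raises IndexError indexing the first element.
def Pre_homework_2 (lst : List Int) : Prop := lst ≠ []
instance (lst : List Int) : Decidable (Pre_homework_2 lst) := by unfold Pre_homework_2; infer_instance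
def pvWitness_homework_2 : List Int := [3, 2, 8, 7]

def Spec_homework_2 (lst : List Int) (out : Int) : Prop := out = homework_2_alt lst
instance (lst : List Int) (out : Int) : Decidable (Spec_homework_2 lst out) := by unfold Spec_homework_2; infer_instance

-- ===== CLAIM (what is proved, stated in full; the proofs are below) =====
def Claim_equal_homework_2 : Prop := ∀ (lst : List Int), Dom_homework_2 lst → Pre_homework_2 lst → Spec_homework_2 lst (homework_2 lst)

-- ===== LEMMAS AND PROOFS =====

-- Reference recurrence: total extra steps for the remaining values given the previous target.
def hwT : List Int → Int → Int
  | [], _ => 0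
  | v :: rest, prev =>
    let t := max (v + PySem.Int.mod v 2) (prev + 2)
    (t - v) + hwT rest t

-- ---- A side ----

lemma getD_of_drop (lst : List Int) (n : Nat) (i : Int) (rest : List Int)
    (h : lst.drop n = i :: rest) : lst.getD n 0 = i := by
  have h1 : lst[n]? = some i := by
    rw [← List.head?_drop, h]; rfl
  simp [List.getD, h1]

lemma drop_succ_of_drop (lst : List Int) (n : Nat) (i : Int) (rest : List Int)
    (h : lst.drop n = i :: rest) : lst.drop (n + 1) = rest := by
  have : lst.drop (n + 1) = (lst.drop n).drop 1 := by
    rw [List.drop_drop]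
  simp [this, h]

lemma lt_length_of_drop (lst : List Int) (n : Nat) (i : Int) (rest : List Int)
    (h : lst.drop n = i :: rest) : n < lst.length := by
  by_contra hn
  push Not at hn
  rw [List.drop_eq_nil_of_le hn] at h
  simp at h

lemma hwA_loop_eq_hwT (rest : List Int) : ∀ (lst : List Int) (now : Nat) (step prev : Int),
    1 ≤ now → lst.drop now = rest → lst.getD (now - 1) 0 = prev → prev % 2 = 0 →
    hwA_loop rest lst now step = step + hwT rest prev := by
  induction rest with
  | nil => intro lst now step prev _ _ _ _; simp [hwA_loop, hwT]
  | cons i rest ih =>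
    intro lst now step prev hnow hdrop hgetD hev
    have hlt : now < lst.length := lt_length_of_drop lst now i rest hdrop
    have hi : lst.getD now 0 = i := getD_of_drop lst now i rest hdrop
    have hdrop' : lst.drop (now + 1) = rest := drop_succ_of_drop lst now i rest hdrop
    have hmod : PySem.Int.mod i 2 = i % 2 := by
      simp [PySem.Int.mod, Int.fmod_eq_emod]
    have hi2 : 0 ≤ i % 2 ∧ i % 2 < 2 := ⟨Int.emod_nonneg i (by norm_num), Int.emod_lt_of_pos i (by norm_num)⟩
    rw [hwA_loop, hwT]
    simp only [hgetD, hmod]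
    by_cases hle : i ≤ prev
    · -- A sets lst[now] := prev + 2
      have hmax : max (i + i % 2) (prev + 2) = prev + 2 := by omega
      simp only [if_pos hle, hmax]
      have hset_drop : (lst.set now (prev + 2)).drop (now + 1) = rest := by
        rw [List.drop_set_of_lt (by omega)]
        exact hdrop'
      have hset_get : (lst.set now (prev + 2)).getD (now + 1 - 1) 0 = prev + 2 := by
        simp [List.getD, List.getElem?_set_self hlt]
      rw [ih _ (now + 1) _ (prev + 2) (by omega) hset_drop hset_get (by omega)]
      ring_nf
    · by_cases hodd : i % 2 ≠ 0
      · -- A sets lst[now] := i + 1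
        have hmax : max (i + i % 2) (prev + 2) = i + 1 := by omega
        simp only [if_neg hle, if_pos hodd, hi, hmax]
        have hset_drop : (lst.set now (i + 1)).drop (now + 1) = rest := by
          rw [List.drop_set_of_lt (by omega)]
          exact hdrop'
        have hset_get : (lst.set now (i + 1)).getD (now + 1 - 1) 0 = i + 1 := by
          simp [List.getD, List.getElem?_set_self hlt]
        rw [ih _ (now + 1) _ (i + 1) (by omega) hset_drop hset_get (by omega)]
        ring_nf
      · -- i even, i > prev: A leaves lst alone
        have hmax : max (i + i % 2) (prev + 2) = i := by omega
        simp only [if_neg hle, if_neg hodd, hmax]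
        have hget : lst.getD (now + 1 - 1) 0 = i := by simpa using hi
        rw [ih lst (now + 1) _ i (by omega) hdrop' hget (by omega)]
        ring_nf

-- ---- B side ----

-- prefix maxima of a key list, seeded with the current maximum
def hwPM : List Int → Int → List Int
  | [], _ => []
  | k :: ks, m => max m k :: hwPM ks (max m k)

-- B's key list for the values vs starting at index s
def hwKeys (vs : List Int) (s : Int) : List Int :=
  (PySem.List.enumerate vs s).map (fun p => p.2 + PySem.Int.mod p.2 2 - 2 * p.1)

lemma hwKeys_nil (s : Int) : hwKeys [] s = [] := by
  simp [hwKeys, PySem.List.enumerate_nil]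

lemma hwKeys_cons (v : Int) (vs : List Int) (s : Int) :
    hwKeys (v :: vs) s = (v + PySem.Int.mod v 2 - 2 * s) :: hwKeys vs (s + 1) := by
  simp [hwKeys, PySem.List.enumerate_cons]

lemma hwB_maxs_nil_cons (k : Int) (ks : List Int) :
    hwB_maxs (k :: ks) [] = hwB_maxs ks [k] := rfl

lemma hwB_maxs_acc : ∀ (ks acc : List Int) (m : Int), acc.getLast? = some m →
    hwB_maxs ks acc = acc ++ hwPM ks m := by
  intro ks
  induction ks with
  | nil => intro acc m _; simp [hwB_maxs, hwPM]
  | cons k ks ih =>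
    intro acc m hm
    rw [hwB_maxs, hwPM]
    simp only [hm]
    have hnxt : (if k > m then k else m) = max m k := by omega
    rw [hnxt, ih (acc ++ [max m k]) (max m k) (by simp)]
    simp

lemma stage3_eq : ∀ (vs : List Int) (M s tot : Int),
    (PySem.List.enumerate ((hwPM (hwKeys vs s) M).zip vs) s).foldl
      (fun tot p => tot + ((p.2.1 + 2 * p.1) - p.2.2)) tot
    = tot + hwT vs (M + 2 * s - 2) := by
  intro vs
  induction vs with
  | nil => intro M s tot; simp [hwKeys_nil, hwPM, PySem.List.enumerate_nil, hwT]
  | cons v vs ih =>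
    intro M s tot
    rw [hwKeys_cons, hwPM, hwT]
    have hm : max M (v + PySem.Int.mod v 2 - 2 * s) + 2 * s
        = max (v + PySem.Int.mod v 2) (M + 2 * s - 2 + 2) := by omega
    simp only [List.zip_cons_cons, PySem.List.enumerate_cons, List.foldl_cons]
    rw [ih]
    rw [show max M (v + PySem.Int.mod v 2 - 2 * s) + 2 * (s + 1) - 2
        = max (v + PySem.Int.mod v 2) (M + 2 * s - 2 + 2) from by omega]
    omega

-- ===== VERDICT (by name: the statement is the Claim_ definition above) =====
theorem homework_2_spec : Claim_equal_homework_2 := by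
  intro lst _ hpre
  unfold Spec_homework_2
  match lst with
  | [] => exact absurd rfl hpre
  | x0 :: rest =>
    -- reduce B's port to (e x0 - x0) + hwT rest (e x0)
    have hB : homework_2_alt (x0 :: rest)
        = (x0 + PySem.Int.mod x0 2 - x0) + hwT rest (x0 + PySem.Int.mod x0 2) := by
      unfold homework_2_alt
      have hk : (PySem.List.enumerate (x0 :: rest) 0).map
          (fun p => p.2 + PySem.Int.mod p.2 2 - 2 * p.1)
          = (x0 + PySem.Int.mod x0 2 - 2 * 0) :: hwKeys rest (0 + 1) := by
        rw [show (PySem.List.enumerate (x0 :: rest) 0).map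
            (fun p => p.2 + PySem.Int.mod p.2 2 - 2 * p.1) = hwKeys (x0 :: rest) 0 from rfl,
          hwKeys_cons]
      simp only [hk, hwB_maxs_nil_cons]
      rw [hwB_maxs_acc (hwKeys rest (0 + 1)) [x0 + PySem.Int.mod x0 2 - 2 * 0]
        (x0 + PySem.Int.mod x0 2 - 2 * 0) rfl]
      simp only [List.singleton_append, List.zip_cons_cons,
        PySem.List.enumerate_cons, List.foldl_cons]
      rw [stage3_eq rest (x0 + PySem.Int.mod x0 2 - 2 * 0) (0 + 1)]
      have h1 : x0 + PySem.Int.mod x0 2 - 2 * 0 - 2 * 0 = x0 + PySem.Int.mod x0 2 := by omega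
      have h2 : x0 + PySem.Int.mod x0 2 - 2 * 0 + 2 * (0 + 1) - 2 = x0 + PySem.Int.mod x0 2 := by
        omega
      rw [h2]
      ring_nf
    rw [hB]
    unfold homework_2
    have hget : PySem.List.pyGet? (x0 :: rest) 0 = some x0 := by
      simp [PySem.List.pyGet?, PySem.List.pyIdx?]
    have hslice : ∀ y : Int, PySem.List.slice (y :: rest) (some 1) none = rest := by
      intro y
      simpa using PySem.List.slice_from_one (y :: rest)
    have hmod : PySem.Int.mod x0 2 = x0 % 2 := by simp [PySem.Int.mod, Int.fmod_eq_emod]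
    have hx2 : 0 ≤ x0 % 2 ∧ x0 % 2 < 2 :=
      ⟨Int.emod_nonneg x0 (by norm_num), Int.emod_lt_of_pos x0 (by norm_num)⟩
    rw [hget]
    simp only [hmod]
    by_cases hodd : x0 % 2 ≠ 0
    · have hset : (x0 :: rest).set 0 (x0 + 1) = (x0 + 1) :: rest := rfl
      simp only [if_pos hodd, hset, hslice]
      rw [hwA_loop_eq_hwT rest ((x0 + 1) :: rest) 1 1 (x0 + 1) (le_refl 1) rfl rfl (by omega)]
      have : x0 + x0 % 2 = x0 + 1 := by omega
      rw [this]
      ring_nf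
    · simp only [if_neg hodd, hslice]
      push Not at hodd
      rw [hwA_loop_eq_hwT rest (x0 :: rest) 1 0 x0 (le_refl 1) rfl rfl hodd]
      have : x0 + x0 % 2 = x0 := by omega
      rw [this]
      ring_nf
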